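-- pv_equiv track=rewrite | github.com/thekoushikdurgas/appointmentbackend | app/api/v1/endpoints/contacts_websocket.py | _normalize_array_values
-- ===== SOURCE A (Python) =====
-- from typing import Any, Iterable, List, Optional
--
-- def _parse_iterable_like(value: Any) -> Iterable[str]:
--     """Best effort parsing for list-like attribute payloads."""
--     if value is None:
--         return []
--     if isinstance(value, str):
--         # Split comma-separated values
--         return [v.strip() for v in value.split(",") if v.strip()]
--     if isinstance(value, (list, tuple)):
--         return [str(v).strip() for v in value if v]
--     return [str(value).strip()]
--
-- def _normalize_array_values(values: Iterable[Any]) -> List[str]: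
--     """Flatten heterogeneous attribute values into a sorted, deduplicated list."""
--     flattened: list[str] = []
--     for entry in values:
--         flattened.extend(_parse_iterable_like(entry))
--     deduped: dict[str, str] = {}
--     for token in flattened:
--         if not token:
--             continue
--         key = token.lower()
--         if key not in deduped:
--             deduped[key] = token
--     return sorted(deduped.values(), key=str.lower)
-- ===== SOURCE B (Python) =====
-- def _parse_iterable_like(value):
--     """Best effort parsing for list-like attribute payloads."""
--     if value is None:
--         return []
--     if isinstance(value, str):
--         return [v.strip() for v in value.split(",") if v.strip()]
--     if isinstance(value, (list, tuple)):
--         return [str(v).strip() for v in value if v]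
--     return [str(value).strip()]
--
-- def _normalize_array_values(values):
--     """Flatten, stable-sort by lowercase, then collapse equal-lowercase runs in one pass."""
--     tokens = []
--     for entry in values:
--         tokens.extend(_parse_iterable_like(entry))
--     out = []
--     prev = None
--     for tok in sorted(tokens, key=str.lower):
--         if not tok:
--             continue
--         k = tok.lower()
--         if k != prev:
--             out.append(tok)
--             prev = k
--     return out
-- ===== Notes on version B (the rewrite author's own statement) =====
-- stated objective: alternative
-- what changed: Replaces A's dict-based first-seen dedup followed by a key sort with a stable sort by lowercase followed by a single pass that keeps the first element of each equal-lowercase run (dict dedup disappears).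
import Mathlib
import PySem

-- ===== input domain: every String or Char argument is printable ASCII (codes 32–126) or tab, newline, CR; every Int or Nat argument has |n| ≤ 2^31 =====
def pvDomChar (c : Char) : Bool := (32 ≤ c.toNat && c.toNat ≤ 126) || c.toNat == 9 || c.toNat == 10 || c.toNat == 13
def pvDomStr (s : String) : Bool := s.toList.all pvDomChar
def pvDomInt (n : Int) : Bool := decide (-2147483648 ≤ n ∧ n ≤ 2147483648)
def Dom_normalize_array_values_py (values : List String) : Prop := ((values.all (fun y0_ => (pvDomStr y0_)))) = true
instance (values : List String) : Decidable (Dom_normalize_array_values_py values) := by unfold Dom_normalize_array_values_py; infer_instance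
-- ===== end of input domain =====

-- B replaces A's dict-based first-seen dedup followed by a key sort with a stable sort by lowercase
-- followed by a single pass keeping the first element of each equal-lowercase run (objective: alternative decomposition).

-- ===== PORT A =====
-- _parse_iterable_like on a str argument (the only case for values : List String):
-- [v.strip() for v in value.split(",") if v.strip()]  ("," ≠ "" so Str.split? is always `some`)
def pvParse (e : String) : List String :=
  (((PySem.Str.split? e ",").getD []).filter (fun v => PySem.Str.strip v ≠ "")).map PySem.Str.strip

def normalize_array_values_py (values : List String) : List String :=
  let flattened := values.foldl (fun acc e => acc ++ pvParse e) []
  let deduped := flattened.foldl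
    (fun d token =>
      if token = "" then d
      else
        let key := PySem.Str.lower token
        if d.contains key then d else d.insert key token)
    (PySem.Dict.empty : PySem.Dict String String)
  PySem.List.sorted (PySem.Dict.values deduped) (fun s => PySem.Str.lower s) false

-- ===== PORT B =====
def normalize_array_values_py_alt (values : List String) : List String :=
  let tokens := values.foldl (fun acc e => acc ++ pvParse e) []
  let ordered := PySem.List.sorted tokens (fun s => PySem.Str.lower s) false
  (ordered.foldl
    (fun st tok =>
      if tok = "" then st
      else
        let k := PySem.Str.lower tok
        if st.2 = some k then st else (st.1 ++ [tok], some k))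
    (([] : List String), (none : Option String))).1

-- ===== PRECONDITION & SPEC =====
def Spec_normalize_array_values_py (values : List String) (out : List String) : Prop := out = normalize_array_values_py_alt values
instance (values : List String) (out : List String) : Decidable (Spec_normalize_array_values_py values out) := by unfold Spec_normalize_array_values_py; infer_instance

-- ===== CLAIM (what is proved, stated in full; the proofs are below) =====
def Claim_equal_normalize_array_values_py : Prop := ∀ (values : List String), Dom_normalize_array_values_py values → Spec_normalize_array_values_py values (normalize_array_values_py values)

-- ===== LEMMAS AND PROOFS =====

-- first-occurrence dedup by lowercase key: the proof-side specification both loops are reduced to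
def dedupF : List String → List String
  | [] => []
  | x :: t => x :: dedupF (t.filter (fun y => PySem.Str.lower y ≠ PySem.Str.lower x))
termination_by l => l.length
decreasing_by
  have h := List.length_filter_le (fun y : {z // z ∈ t} => !decide (PySem.Str.lower y.1 = PySem.Str.lower x)) t.attach
  simp at h ⊢
  omega

-- induction along dedupF's recursion (plain form, avoiding the attach-encoded functional induct)
theorem dedupF_ind (P : List String → Prop) (h0 : P [])
    (h1 : ∀ x t, P (t.filter (fun y => PySem.Str.lower y ≠ PySem.Str.lower x)) → P (x :: t)) :
    ∀ l, P l := by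
  have key : ∀ n (l : List String), l.length ≤ n → P l := by
    intro n
    induction n with
    | zero => intro l hl; cases l with
      | nil => exact h0
      | cons x t => simp at hl
    | succ n ih =>
      intro l hl
      cases l with
      | nil => exact h0
      | cons x t =>
        exact h1 x t (ih _ (le_trans (List.length_filter_le _ _) (by simpa using hl)))
  exact fun l => key l.length l le_rfl

theorem sublist_dedupF : ∀ (l : List String), (dedupF l).Sublist l := by
  refine dedupF_ind _ (by simp [dedupF]) ?_
  intro x t ih
  rw [dedupF]
  exact List.Sublist.cons₂ x (ih.trans List.filter_sublist)

theorem pairwise_ne_dedupF : ∀ (l : List String),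
    (dedupF l).Pairwise (fun a b => PySem.Str.lower a ≠ PySem.Str.lower b) := by
  refine dedupF_ind _ (by simp [dedupF]) ?_
  intro x t ih
  rw [dedupF]
  refine List.Pairwise.cons (fun b hb => ?_) ih
  have hb' := (sublist_dedupF _).mem hb
  have := List.of_mem_filter hb'
  simp at this
  exact fun h => this h.symm

theorem nodup_dedupF (l : List String) : (dedupF l).Nodup :=
  (pairwise_ne_dedupF l).imp (fun h heq => h (by rw [heq]))

-- membership in dedupF = being the first element of one's lowercase class
theorem mem_dedupF_iff (a : String) : ∀ (l : List String),
    a ∈ dedupF l ↔ (l.filter (fun y => decide (PySem.Str.lower y = PySem.Str.lower a))).head? = some a := by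
  refine dedupF_ind _ (by simp [dedupF]) ?_
  intro x t ih
  rw [dedupF]
  by_cases hk : PySem.Str.lower x = PySem.Str.lower a
  · rw [List.filter_cons_of_pos (by simpa using hk)]
    simp only [List.head?_cons, List.mem_cons, Option.some.injEq]
    constructor
    · rintro (rfl | hmem)
      · rfl
      · exfalso
        have hmem' := (sublist_dedupF _).mem hmem
        have := List.of_mem_filter hmem'
        simp at this
        exact this hk.symm
    · intro h
      exact Or.inl h.symm
  · rw [List.filter_cons_of_neg (by simpa using hk)]
    have hx : a ≠ x := fun h => hk (by rw [h])
    have hfil : (t.filter (fun y => decide (PySem.Str.lower y ≠ PySem.Str.lower x))).filter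
          (fun y => decide (PySem.Str.lower y = PySem.Str.lower a)) =
        t.filter (fun y => decide (PySem.Str.lower y = PySem.Str.lower a)) := by
      rw [List.filter_filter]
      refine List.filter_congr (fun y _ => ?_)
      by_cases hy : PySem.Str.lower y = PySem.Str.lower a
      · have hyx : PySem.Str.lower y ≠ PySem.Str.lower x := fun h => hk (h.symm.trans hy)
        have hax : ¬ PySem.Str.lower a = PySem.Str.lower x := fun h => hk h.symm
        simp [hy, hax]
      · simp [hy]
    rw [← hfil]
    simp only [List.mem_cons]
    constructor
    · rintro (rfl | hmem)
      · exact absurd rfl hx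
      · exact ih.mp hmem
    · exact fun h => Or.inr (ih.mpr h)

-- insertBy at an element whose key misses the filter leaves the filter unchanged
theorem filter_insertBy_of_neg (before : String → String → Bool) (p : String → Bool) (x : String)
    (hx : p x = false) : ∀ (ys : List String),
    (PySem.List.insertBy before x ys).filter p = ys.filter p := by
  intro ys
  induction ys with
  | nil => simp [PySem.List.insertBy, hx]
  | cons y t ih =>
    rw [PySem.List.insertBy]
    by_cases hb : before x y = true
    · simp [hb, hx]
    · simp [hb, List.filter_cons, ih]

-- stability at the heart: inserting x into a key-sorted list appends it to its own key class
theorem filter_insertBy_of_pos (x : String) (k : String) (hk : PySem.Str.lower x = k) :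
    ∀ (ys : List String), ys.Pairwise (fun a b => PySem.Str.lower a ≤ PySem.Str.lower b) →
    (PySem.List.insertBy (fun a b => decide (PySem.Str.lower a < PySem.Str.lower b)) x ys).filter
        (fun y => decide (PySem.Str.lower y = k)) =
      ys.filter (fun y => decide (PySem.Str.lower y = k)) ++ [x] := by
  intro ys
  induction ys with
  | nil => simp [PySem.List.insertBy, hk]
  | cons y t ih =>
    intro hp
    rw [PySem.List.insertBy]
    by_cases hb : PySem.Str.lower x < PySem.Str.lower y
    · simp only [hb, decide_true, if_true]
      have hnone : (y :: t).filter (fun y => decide (PySem.Str.lower y = k)) = [] := by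
        rw [List.filter_eq_nil_iff]
        intro z hz
        have hyz : PySem.Str.lower y ≤ PySem.Str.lower z := by
          rcases hz with _ | hz'
          · exact le_refl _
          · exact List.rel_of_pairwise_cons hp (by assumption)
        simp only [decide_eq_true_eq]
        intro hzk
        rw [← hk] at hzk
        exact absurd (lt_of_lt_of_le hb hyz) (by rw [hzk]; exact lt_irrefl _)
      rw [List.filter_cons_of_pos (by simp [hk]), hnone]
      simp
    · have hq : (if (decide (PySem.Str.lower x < PySem.Str.lower y)) = true then x :: y :: t
          else y :: PySem.List.insertBy (fun a b => decide (PySem.Str.lower a < PySem.Str.lower b)) x t) =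
          y :: PySem.List.insertBy (fun a b => decide (PySem.Str.lower a < PySem.Str.lower b)) x t := by
        simp [hb]
      rw [hq, List.filter_cons, ih (List.Pairwise.of_cons hp)]
      by_cases hyk : PySem.Str.lower y = k
      · simp [hyk]
      · simp [hyk]

-- stability of Python's sort: each lowercase class keeps its original order
theorem filter_sorted (l : List String) (k : String) :
    (PySem.List.sorted l (fun s => PySem.Str.lower s) false).filter (fun y => decide (PySem.Str.lower y = k)) =
      l.filter (fun y => decide (PySem.Str.lower y = k)) := by
  induction l using List.reverseRecOn with
  | nil => simp [PySem.List.sorted_eq_foldl_insertBy]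
  | append_singleton l x ih =>
    rw [PySem.List.sorted_eq_foldl_insertBy, List.foldl_append, List.foldl_cons, List.foldl_nil,
      ← PySem.List.sorted_eq_foldl_insertBy]
    by_cases hxk : PySem.Str.lower x = k
    · rw [filter_insertBy_of_pos x k hxk _ (PySem.List.sorted_pairwise l _), ih,
        List.filter_append, List.filter_cons_of_pos (by simpa using hxk)]
      simp
    · rw [filter_insertBy_of_neg _ _ x (by simpa using hxk), ih, List.filter_append,
        List.filter_cons_of_neg (by simpa using hxk)]
      simp

-- core: sorting the first-occurrence dedup = deduping the stable sort
theorem sorted_dedupF (l : List String) :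
    PySem.List.sorted (dedupF l) (fun s => PySem.Str.lower s) false =
      dedupF (PySem.List.sorted l (fun s => PySem.Str.lower s) false) := by
  apply PySem.List.sorted_eq_of_perm_of_pairwise_lt
  · rw [List.perm_ext_iff_of_nodup (nodup_dedupF _) (nodup_dedupF _)]
    intro a
    rw [mem_dedupF_iff, mem_dedupF_iff, filter_sorted]
  · have hle : (dedupF (PySem.List.sorted l (fun s => PySem.Str.lower s) false)).Pairwise
        (fun a b => PySem.Str.lower a ≤ PySem.Str.lower b) :=
      (PySem.List.sorted_pairwise l _).sublist (sublist_dedupF _)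
    exact (hle.and (pairwise_ne_dedupF _)).imp (fun h => lt_of_le_of_ne h.1 h.2)

-- A's dict loop computes dedupF of its input (the dict values, in insertion order)
theorem dictLoop_values : ∀ (l : List String) (d : PySem.Dict String String),
    (∀ t ∈ l, t ≠ "") → d.keys = d.values.map (fun s => PySem.Str.lower s) →
    (l.foldl
      (fun d token =>
        if token = "" then d
        else
          let key := PySem.Str.lower token
          if d.contains key then d else d.insert key token) d).values =
      d.values ++ dedupF (l.filter (fun t => !(d.contains (PySem.Str.lower t)))) := by
  intro l
  induction l with
  | nil => intro d _ _; simp [dedupF]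
  | cons t rest ih =>
    intro d hne hkeys
    have ht : t ≠ "" := hne t (by simp)
    rw [List.foldl_cons]
    rw [if_neg ht]
    by_cases hc : d.contains (PySem.Str.lower t) = true
    · rw [if_pos hc, ih d (fun z hz => hne z (by simp [hz])) hkeys,
        List.filter_cons_of_neg (by simp [hc])]
    · have hc' : d.contains (PySem.Str.lower t) = false := by
        cases h : d.contains (PySem.Str.lower t)
        · rfl
        · exact absurd h hc
      rw [if_neg (by simp [hc'])]
      have hval : (d.insert (PySem.Str.lower t) t).values = d.values ++ [t] := by
        simp [PySem.Dict.values, PySem.Dict.items_insert_of_not_contains d t hc']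
      have hkeys' : (d.insert (PySem.Str.lower t) t).keys =
          (d.insert (PySem.Str.lower t) t).values.map (fun s => PySem.Str.lower s) := by
        rw [hval, PySem.Dict.keys_insert_of_not_contains d t hc', hkeys]
        simp
      rw [ih _ (fun z hz => hne z (by simp [hz])) hkeys', hval,
        List.filter_cons_of_pos (by simp [hc'])]
      have hfil : rest.filter (fun y => !((d.insert (PySem.Str.lower t) t).contains (PySem.Str.lower y))) =
          (rest.filter (fun y => !(d.contains (PySem.Str.lower y)))).filter
            (fun y => PySem.Str.lower y ≠ PySem.Str.lower t) := by
        rw [List.filter_filter]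
        refine List.filter_congr (fun y _ => ?_)
        rw [PySem.Dict.contains_insert]
        by_cases h1 : PySem.Str.lower y = PySem.Str.lower t
        · simp [h1]
        · simp [h1]
      rw [hfil, dedupF]
      simp

-- B's run-collapsing scan over a key-sorted list computes dedupF
theorem scanLoop : ∀ (s : List String) (res : List String) (p : Option String),
    s.Pairwise (fun a b => PySem.Str.lower a ≤ PySem.Str.lower b) → (∀ t ∈ s, t ≠ "") →
    (∀ k, p = some k → ∀ y ∈ s, k ≤ PySem.Str.lower y) →
    (s.foldl
      (fun st tok =>
        if tok = "" then st
        else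
          let k := PySem.Str.lower tok
          if st.2 = some k then st else (st.1 ++ [tok], some k)) (res, p)).1 =
      res ++ dedupF (s.filter (fun y => !(p == some (PySem.Str.lower y)))) := by
  intro s
  induction s with
  | nil => intro res p _ _ _; simp [dedupF]
  | cons t rest ih =>
    intro res p hp hne hbound
    have ht : t ≠ "" := hne t (by simp)
    rw [List.foldl_cons]
    rw [if_neg ht]
    by_cases hpt : p = some (PySem.Str.lower t)
    · rw [if_pos hpt]
      rw [ih res p (List.Pairwise.of_cons hp) (fun z hz => hne z (by simp [hz]))
        (fun k hk y hy => hbound k hk y (by simp [hy])),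
        List.filter_cons_of_neg (by simp [hpt])]
    · rw [if_neg hpt]
      have hrest : rest.filter (fun y => !(some (PySem.Str.lower t) == some (PySem.Str.lower y))) =
          (rest.filter (fun y => !(p == some (PySem.Str.lower y)))).filter
            (fun y => PySem.Str.lower y ≠ PySem.Str.lower t) := by
        rw [List.filter_filter]
        refine List.filter_congr (fun y hy => ?_)
        have hty : PySem.Str.lower t ≤ PySem.Str.lower y := List.rel_of_pairwise_cons hp hy
        have hpy : ¬ p = some (PySem.Str.lower y) := by
          intro hcase
          cases p with
          | none => simp at hcase
          | some k =>
            have hk := hbound k rfl t (by simp)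
            have hky : k = PySem.Str.lower y := by injection hcase
            have hne' : k ≠ PySem.Str.lower t := fun h => hpt (by rw [h])
            have hlt : k < PySem.Str.lower t := lt_of_le_of_ne hk hne'
            rw [hky] at hlt
            exact absurd hty (not_le_of_gt hlt)
        by_cases h1 : PySem.Str.lower y = PySem.Str.lower t
        · simp [h1]
        · have h1' : ¬ PySem.Str.lower t = PySem.Str.lower y := fun h => h1 h.symm
          simp [h1, h1', hpy]
      rw [ih (res ++ [t]) (some (PySem.Str.lower t)) (List.Pairwise.of_cons hp)
        (fun z hz => hne z (by simp [hz]))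
        (fun k hk y hy => by
          injection hk with hk'
          rw [← hk']
          exact List.rel_of_pairwise_cons hp hy),
        hrest, List.filter_cons_of_pos (by simp [hpt]), dedupF]
      simp

theorem flattened_ne_nil (values : List String) :
    ∀ t ∈ values.foldl (fun acc e => acc ++ pvParse e) [], t ≠ "" := by
  intro t ht
  rw [PySem.List.foldl_append_eq_flatMap] at ht
  simp only [List.nil_append, List.mem_flatMap] at ht
  obtain ⟨e, _, hte⟩ := ht
  simp only [pvParse, List.mem_map, List.mem_filter] at hte
  obtain ⟨v, ⟨_, hv⟩, rfl⟩ := hte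
  simpa using hv

-- ===== VERDICT (by name: the statement is the Claim_ definition above) =====
theorem normalize_array_values_py_spec : Claim_equal_normalize_array_values_py := by
  intro values _
  unfold Spec_normalize_array_values_py normalize_array_values_py normalize_array_values_py_alt
  dsimp only
  have hne := flattened_ne_nil values
  set flat := values.foldl (fun acc e => acc ++ pvParse e) [] with hflat
  -- A side: dict values = dedupF flat
  rw [dictLoop_values flat PySem.Dict.empty hne (by simp [PySem.Dict.empty, PySem.Dict.keys, PySem.Dict.values])]
  have hfa : flat.filter (fun t => !((PySem.Dict.empty : PySem.Dict String String).contains (PySem.Str.lower t))) = flat := by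
    rw [List.filter_eq_self]
    intro a _
    simp [PySem.Dict.empty, PySem.Dict.contains]
  rw [hfa]
  simp only [PySem.Dict.values, PySem.Dict.empty, List.map_nil, List.nil_append]
  -- B side: scan over the sorted list = dedupF of the sorted list
  rw [scanLoop (PySem.List.sorted flat (fun s => PySem.Str.lower s) false) [] none
    (PySem.List.sorted_pairwise flat _)
    (fun z hz => hne z ((PySem.List.mem_sorted flat _ false z).mp hz))
    (fun k hk y hy => by simp at hk)]
  have hfb : (PySem.List.sorted flat (fun s => PySem.Str.lower s) false).filter
      (fun y => !((none : Option String) == some (PySem.Str.lower y))) =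
      PySem.List.sorted flat (fun s => PySem.Str.lower s) false := by
    rw [List.filter_eq_self]
    intro a _
    rfl
  rw [hfb, List.nil_append]
  exact sorted_dedupF flat
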